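-- pv_equiv track=rewrite | github.com/Gleb-05/MakeFuncForDC | MakeFuncForDC.py | make_z_intersection_table
-- ===== SOURCE A (Python) =====
-- def cleaned(table):
--     return {key: val for key, val in table.items() if len(val) > 1}
--
-- def make_mask(n):
--     mask = []
--     for i in range(2**n):
--         bin_i = bin(i)[2:]
--         if bin_i.count('1') < 2:
--             continue
--         bin_i = bin_i.zfill(n)
--         mask.append(bin_i)
--     return mask
--
-- def use_mask(word, mask):
--     return [word[i] for i in range(len(word)) if mask[i]=='1']
--
-- def make_z_intersection_table(data):
--     table = {}
--     for c in data:
--         covered_z = data[c]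
--         for mask in make_mask(len(covered_z)):
--             mz = ' '.join(use_mask(covered_z, mask))
--             if mz not in table:
--                 table[mz] = [c]
--                 continue
--             table[mz].append(c)
--     return cleaned(table)
-- ===== SOURCE B (Python) =====
-- def _subseqs(xs):
--     # all subsequences of xs, in the order induced by increasing bitmasks
--     # with the first element on the most significant bit
--     if not xs:
--         return [[]]
--     rest = _subseqs(xs[1:])
--     return rest + [[xs[0]] + s for s in rest]
--
-- def make_z_intersection_table(data):
--     table = {}
--     for c, covered_z in data.items():
--         for sub in _subseqs(covered_z):
--             if len(sub) < 2:
--                 continue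
--             table.setdefault(' '.join(sub), []).append(c)
--     return {key: val for key, val in table.items() if len(val) > 1}
-- ===== Notes on version B (the rewrite author's own statement) =====
-- stated objective: faster
-- what changed: Replaces the flat 2^n bitmask enumeration (bin/zfill/count-of-'1' string masks filtered and applied by indexed selection) with a structural recursion that builds the list of subsequences directly, in the same order, skipping those shorter than 2; the table is filled with dict.setdefault instead of a membership test, and make_mask/use_mask disappear.
import Mathlib
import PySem

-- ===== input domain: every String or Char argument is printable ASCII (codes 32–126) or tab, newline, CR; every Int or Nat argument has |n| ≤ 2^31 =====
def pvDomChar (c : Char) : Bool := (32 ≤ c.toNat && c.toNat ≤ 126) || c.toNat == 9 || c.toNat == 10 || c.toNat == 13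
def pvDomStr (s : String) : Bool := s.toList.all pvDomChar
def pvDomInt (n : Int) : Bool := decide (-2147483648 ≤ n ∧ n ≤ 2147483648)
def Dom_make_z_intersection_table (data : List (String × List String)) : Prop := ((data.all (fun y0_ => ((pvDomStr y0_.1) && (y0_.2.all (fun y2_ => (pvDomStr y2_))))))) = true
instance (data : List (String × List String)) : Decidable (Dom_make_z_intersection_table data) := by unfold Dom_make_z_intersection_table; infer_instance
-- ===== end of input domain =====

-- B replaces A's flat 2^n binary-string-mask enumeration (bin/zfill/count/indexed selection) by a
-- structural recursion that builds all subsequences of the list directly; objective: faster (constant factor).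

-- ===== PORT A =====
def pyMakeMask (n : Nat) : List (List Char) :=
  (List.range (2 ^ n)).foldl (fun (mask : List (List Char)) (i : Nat) =>
    let bin_i := PySem.Int.toBinChars (i : Int)
    if PySem.Chars.count bin_i ['1'] < 2 then mask
    else mask ++ [PySem.Chars.zfill bin_i (n : Int)]) []

def pyUseMask (word : List String) (mask : List Char) : List String :=
  ((List.range word.length).filter (fun i => mask.getD i ' ' == '1')).map (fun i => word.getD i "")

-- cleaned(table): dict comprehension keeping entries with len(val) > 1; table's keys are
-- unique, so re-inserting the kept (key, val) pairs in order is exactly filtering the items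
def cleanedA (table : PySem.Dict String (List String)) : List (String × List String) :=
  table.items.filter (fun kv => 1 < kv.2.length)

def make_z_intersection_table (data : List (String × List String)) : List (String × List String) :=
  let d := PySem.Dict.mk data
  let table : PySem.Dict String (List String) :=
    data.foldl (fun table p =>
      let c := p.1
      let covered_z := d.getD c []          -- data[c]; c comes from data's keys, so no KeyError
      (pyMakeMask covered_z.length).foldl (fun table mask =>
        let mz := PySem.Str.join " " (pyUseMask covered_z mask)
        match table.get? mz with
        | none => table.insert mz [c]
        | some v => table.insert mz (v ++ [c])) table) PySem.Dict.empty
  cleanedA table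

-- ===== PORT B =====
def subseqsB : List String → List (List String)
  | [] => [[]]
  | x :: xs =>
    let rest := subseqsB xs
    rest ++ rest.map (fun s => x :: s)

def make_z_intersection_table_alt (data : List (String × List String)) : List (String × List String) :=
  let table : PySem.Dict String (List String) :=
    data.foldl (fun table p =>
      (subseqsB p.2).foldl (fun table sub =>
        if sub.length < 2 then table
        else
          let mz := PySem.Str.join " " sub
          table.insert mz (table.getD mz [] ++ [p.1])) table) PySem.Dict.empty
  table.items.filter (fun kv => 1 < kv.2.length)

-- ===== PRECONDITION & SPEC =====
-- Pre_ excludes association lists with duplicate keys: they cannot arise from a Python dict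
-- argument (the Python parameter is a dict), so A's behaviour on them is not defined.
def Pre_make_z_intersection_table (data : List (String × List String)) : Prop :=
  (data.map Prod.fst).Nodup
instance (data : List (String × List String)) : Decidable (Pre_make_z_intersection_table data) := by
  unfold Pre_make_z_intersection_table; infer_instance

def pvWitness_make_z_intersection_table : (List (String × List String)) :=
  [("a", ["x", "y"]), ("b", ["x", "y"])]

def Spec_make_z_intersection_table (data : List (String × List String)) (out : List (String × List String)) : Prop := out = make_z_intersection_table_alt data
instance (data : List (String × List String)) (out : List (String × List String)) : Decidable (Spec_make_z_intersection_table data out) := by unfold Spec_make_z_intersection_table; infer_instance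

-- ===== CLAIM (what is proved, stated in full; the proofs are below) =====
def Claim_equal_make_z_intersection_table : Prop := ∀ (data : List (String × List String)), Dom_make_z_intersection_table data → Pre_make_z_intersection_table data → Spec_make_z_intersection_table data (make_z_intersection_table data)

-- ===== LEMMAS AND PROOFS =====

def bdig (n : Nat) : List Char :=
  if _h : n < 2 then [Nat.digitChar n]
  else bdig (n / 2) ++ [Nat.digitChar (n % 2)]
decreasing_by exact Nat.div_lt_self (by omega) (by omega)

lemma toDigitsCore_eq (fuel : Nat) : ∀ (n : Nat) (ds : List Char), n < fuel →
    Nat.toDigitsCore 2 fuel n ds = bdig n ++ ds := by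
  induction fuel with
  | zero => omega
  | succ fuel ih =>
    intro n ds h
    rw [Nat.toDigitsCore]
    by_cases h2 : n / 2 = 0
    · have hn : n < 2 := by omega
      have hm : n % 2 = n := by omega
      simp only [h2, if_true]
      rw [bdig]
      simp [hn, hm]
    · simp only [h2, if_false]
      rw [ih (n / 2) _ (by omega)]
      conv_rhs => rw [bdig]
      have hn : ¬ n < 2 := by omega
      simp [hn]

lemma count_go (c : Char) : ∀ (fuel : Nat) (l : List Char) (acc : Nat), l.length ≤ fuel →
    PySem.Chars.count.go [c] fuel l acc = acc + l.count c := by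
  intro fuel
  induction fuel with
  | zero =>
    intro l acc h
    match l with
    | [] => simp [PySem.Chars.count.go]
  | succ fuel ih =>
    intro l acc h
    match l with
    | [] => simp [PySem.Chars.count.go]
    | x :: t =>
      rw [PySem.Chars.count.go]
      by_cases hx : c = x
      · subst hx
        simp only [List.isPrefixOf, Bool.and_true, beq_self_eq_true, if_pos, List.length_cons,
          List.length_nil, Nat.zero_add, List.drop_succ_cons, List.drop_zero] at *
        rw [ih t (acc+1) (by omega)]
        simp
        omega
      · have hp : ([c].isPrefixOf (x :: t)) = false := by
          simp [List.isPrefixOf, hx]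
        rw [hp]
        simp only [Bool.false_eq_true, if_false]
        rw [ih t acc (by simp at h; omega)]
        have hxc : (x == c) = false := by simp; exact fun e => hx e.symm
        simp [List.count_cons, hxc]
lemma count_single (m : List Char) (c : Char) : PySem.Chars.count m [c] = m.count c := by
  rw [PySem.Chars.count]
  simp [count_go c m.length m 0 (le_refl _)]

lemma bdig_ne_nil (n : Nat) : bdig n ≠ [] := by
  rw [bdig]; split <;> simp

lemma bdig_mem (n : Nat) : ∀ c ∈ bdig n, c = '0' ∨ c = '1' := by
  induction n using Nat.strong_induction_on with
  | _ n ih =>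
    rw [bdig]
    split
    · rename_i h
      interval_cases n <;> simp [Nat.digitChar]
    · rename_i h
      intro c hc
      rcases List.mem_append.mp hc with h1 | h1
      · exact ih (n / 2) (Nat.div_lt_self (by omega) (by omega)) c h1
      · have : n % 2 = 0 ∨ n % 2 = 1 := by omega
        rcases this with e | e <;> simp [e, Nat.digitChar] at h1 <;> simp [h1]

lemma len_bdig_le : ∀ (n j : Nat), j < 2 ^ n → 0 < n → (bdig j).length ≤ n := by
  intro n
  induction n with
  | zero => omega
  | succ n ih =>
    intro j hj _
    by_cases h2 : j < 2
    · rw [bdig]; simp [h2]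
    · rw [bdig]
      rw [dif_neg h2]
      have hlt : j / 2 < 2 ^ n := by
        have : (2:Nat) ^ (n+1) = 2 * 2 ^ n := by ring
        omega
      have hn : 0 < n := by
        rcases Nat.eq_zero_or_pos n with e | e
        · subst e; simp at hj; omega
        · exact e
      have := ih (j / 2) hlt hn
      simp [List.length_append]
      omega

lemma len_bdig_exact : ∀ (n j : Nat), 2 ^ n ≤ j → j < 2 ^ (n + 1) → (bdig j).length = n + 1 := by
  intro n
  induction n with
  | zero => intro j h1 h2
            have : j = 1 := by omega
            subst this
            rw [bdig]; simp
  | succ n ih =>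
    intro j h1 h2
    have h2' : ¬ j < 2 := by
      have : (2:Nat) ≤ 2 ^ (n+1) := by
        calc (2:Nat) = 2 ^ 1 := by norm_num
        _ ≤ 2 ^ (n+1) := Nat.pow_le_pow_right (by norm_num) (by omega)
      omega
    rw [bdig, dif_neg h2']
    have e1 : (2:Nat) ^ (n+1) = 2 * 2 ^ n := by ring
    have e2 : (2:Nat) ^ (n+2) = 2 * 2 ^ (n+1) := by ring
    have := ih (j / 2) (by omega) (by omega)
    simp [List.length_append, this]

lemma tb (n : Nat) : PySem.Int.toBinChars (n : Int) = bdig n := by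
  unfold PySem.Int.toBinChars
  have h : ¬ ((n : Int) < 0) := by omega
  simp only [h, if_false, Int.toNat_natCast]
  rw [Nat.toDigits, toDigitsCore_eq (n+1) n [] (by omega), List.append_nil]

def pb (n j : Nat) : List Char := PySem.Chars.zfill (PySem.Int.toBinChars (j : Int)) (n : Int)

lemma pb_eq (n j : Nat) : pb n j = List.replicate (n - (bdig j).length) '0' ++ bdig j := by
  rw [pb, tb]
  rcases hb : bdig j with _ | ⟨c, rest⟩
  · exact absurd hb (bdig_ne_nil j)
  · have hc : c = '0' ∨ c = '1' := bdig_mem j c (by rw [hb]; simp)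
    rw [PySem.Chars.zfill]
    by_cases hw : (n : Int) ≤ (c :: rest).length
    · rw [if_pos hw]
      have hw' : (n : Int) ≤ rest.length + 1 := by simpa using hw
      have hz : n - (rest.length + 1) = 0 := by omega
      simp [hz]
    · rw [if_neg hw]
      have hs : ¬ (c = '+' ∨ c = '-') := by rcases hc with e | e <;> subst e <;> decide
      simp only [hs, if_false]
      have : ((n:Int)).toNat = n := by omega
      rw [this]

lemma bdig_add_pow : ∀ (n : Nat), 1 ≤ n → ∀ j : Nat, j < 2 ^ n →
    bdig (2 ^ n + j) = '1' :: (List.replicate (n - (bdig j).length) '0' ++ bdig j) := by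
  intro n
  induction n with
  | zero => omega
  | succ n ih =>
    intro _ j hj
    rcases Nat.eq_zero_or_pos n with e | hn
    · subst e
      interval_cases j <;> simp [bdig, Nat.digitChar]
    · have e2 : (2:Nat) ^ (n+1) = 2 * 2 ^ n := by ring
      have hbig : ¬ (2 ^ (n+1) + j) < 2 := by
        have : (2:Nat) ≤ 2 ^ (n+1) := by
          calc (2:Nat) = 2 ^ 1 := by norm_num
          _ ≤ 2 ^ (n+1) := Nat.pow_le_pow_right (by norm_num) (by omega)
        omega
      rw [bdig, dif_neg hbig]
      have ediv : (2 ^ (n+1) + j) / 2 = 2 ^ n + j / 2 := by omega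
      have emod : (2 ^ (n+1) + j) % 2 = j % 2 := by omega
      rw [ediv, emod, ih hn (j / 2) (by omega)]
      by_cases hsmall : j < 2
      · -- bdig j = [digitChar j], j / 2 = 0, bdig 0 = ['0']
        have hj0 : j / 2 = 0 := by omega
        rw [hj0]
        have hb0 : bdig 0 = ['0'] := by rw [bdig]; simp [Nat.digitChar]
        have hbj : bdig j = [Nat.digitChar j] := by rw [bdig]; simp [hsmall]
        have hdm : Nat.digitChar (j % 2) = Nat.digitChar j := by
          congr 1; omega
        rw [hb0, hbj, hdm]
        simp only [List.length_singleton]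
        have hrep : List.replicate (n - 1) '0' ++ ['0'] = List.replicate n '0' := by
          have : n = (n - 1) + 1 := by omega
          rw [this, List.replicate_succ']
          simp
        have hn1 : n + 1 - 1 = n := by omega
        rw [hn1, ← hrep]
        simp
      · -- j ≥ 2 : bdig j = bdig (j/2) ++ [digitChar (j%2)]
        conv_rhs => rw [bdig, dif_neg hsmall]
        have hlen : (bdig (j/2) ++ [Nat.digitChar (j % 2)]).length = (bdig (j/2)).length + 1 := by
          simp
        rw [hlen]
        have : n + 1 - ((bdig (j/2)).length + 1) = n - (bdig (j/2)).length := by omega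
        rw [this]
        simp

lemma pb_zero_cons (n j : Nat) (hn : 1 ≤ n) (hj : j < 2 ^ n) :
    pb (n + 1) j = '0' :: pb n j := by
  rw [pb_eq, pb_eq]
  have hle : (bdig j).length ≤ n := len_bdig_le n j hj (by omega)
  have : n + 1 - (bdig j).length = (n - (bdig j).length) + 1 := by omega
  rw [this, List.replicate_succ]
  simp

lemma pb_one_cons (n j : Nat) (hn : 1 ≤ n) (hj : j < 2 ^ n) :
    pb (n + 1) (2 ^ n + j) = '1' :: pb n j := by
  rw [pb_eq, pb_eq]
  have hlen : (bdig (2 ^ n + j)).length = n + 1 := by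
    apply len_bdig_exact
    · omega
    · have : (2:Nat) ^ (n+1) = 2 * 2 ^ n := by ring
      omega
  rw [hlen, bdig_add_pow n hn j hj]
  simp

lemma len_pb (n j : Nat) (hn : 1 ≤ n) (hj : j < 2 ^ n) : (pb n j).length = n := by
  rw [pb_eq]
  have hle : (bdig j).length ≤ n := len_bdig_le n j hj (by omega)
  simp
  omega

lemma useMask_nil (m : List Char) : pyUseMask [] m = [] := by
  simp [pyUseMask]

lemma useMask_cons (x : String) (xs : List String) (c : Char) (m : List Char) :
    pyUseMask (x :: xs) (c :: m) = (if c = '1' then [x] else []) ++ pyUseMask xs m := by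
  unfold pyUseMask
  rw [List.length_cons, List.range_succ_eq_map]
  rw [List.filter_cons]
  simp only [List.getD_cons_zero, List.filter_map]
  have h1 : (List.filter ((fun i => (c :: m).getD i ' ' == '1') ∘ Nat.succ) (List.range xs.length))
      = List.filter (fun i => m.getD i ' ' == '1') (List.range xs.length) := by
    apply List.filter_congr
    intro i _
    simp
  rw [h1]
  by_cases hc : c = '1'
  · simp [hc]
  · have : (c == '1') = false := by simp [hc]
    simp [this, hc]

lemma main_subs (w : List String) :
    (List.range (2 ^ w.length)).map (fun i => pyUseMask w (pb w.length i)) = subseqsB w := by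
  induction w with
  | nil =>
    simp [subseqsB, useMask_nil]
  | cons x xs ih =>
    by_cases hxs : xs = []
    · subst hxs
      have h0 : pb 1 0 = ['0'] := by rw [pb_eq, bdig]; simp; decide
      have h1 : pb 1 1 = ['1'] := by rw [pb_eq, bdig]; simp; decide
      show (List.range (2 ^ 1)).map _ = _
      rw [show (2:Nat) ^ 1 = 2 from rfl, show List.range 2 = [0, 1] from rfl]
      simp only [List.map_cons, List.map_nil, List.length_cons, List.length_nil, Nat.zero_add, h0, h1]
      rw [useMask_cons, useMask_cons]
      simp [subseqsB, useMask_nil]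
    · have hne : 1 ≤ xs.length := List.length_pos_iff.mpr hxs
      rw [List.length_cons]
      have hpow : (2:Nat) ^ (xs.length + 1) = 2 ^ xs.length + 2 ^ xs.length := by ring
      rw [hpow, List.range_add, List.map_append, List.map_map]
      have hfirst : (List.range (2 ^ xs.length)).map (fun i => pyUseMask (x :: xs) (pb (xs.length + 1) i))
          = (List.range (2 ^ xs.length)).map (fun i => pyUseMask xs (pb xs.length i)) := by
        apply List.map_congr_left
        intro i hi
        rw [List.mem_range] at hi
        rw [pb_zero_cons xs.length i hne hi, useMask_cons]
        simp
      have hsecond : (List.range (2 ^ xs.length)).map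
            ((fun i => pyUseMask (x :: xs) (pb (xs.length + 1) i)) ∘ (fun j => 2 ^ xs.length + j))
          = (List.range (2 ^ xs.length)).map
            ((fun s => x :: s) ∘ (fun j => pyUseMask xs (pb xs.length j))) := by
        apply List.map_congr_left
        intro j hj
        rw [List.mem_range] at hj
        simp only [Function.comp_apply]
        rw [pb_one_cons xs.length j hne hj, useMask_cons]
        simp
      rw [hfirst, hsecond, ← List.map_map, ih]
      simp [subseqsB]

lemma cnt_range (n : Nat) (m : List Char) :
    ((List.range n).filter (fun i => m.getD i ' ' == '1')).length = (m.take n).count '1' := by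
  induction n with
  | zero => simp
  | succ n ih =>
    rw [List.range_succ, List.filter_append, List.length_append, ih]
    by_cases hlt : n < m.length
    · rw [List.take_add_one]
      simp only [List.count_append]
      have he : m[n]? = some m[n] := List.getElem?_eq_getElem hlt
      rw [he]
      have hg : m.getD n ' ' = m[n] := List.getD_eq_getElem m ' ' hlt
      by_cases h1 : m[n] = '1'
      · simp [h1, he]
      · have hb : (m[n] == '1') = false := by simp [h1]
        simp [h1, hb, he]
    · have hn : m[n]? = none := List.getElem?_eq_none (by omega)
      have hg : m.getD n ' ' = ' ' := by rw [List.getD_eq_getElem?_getD, hn]; rfl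
      have ht : m.take (n+1) = m.take n := by
        rw [List.take_of_length_le (by omega), List.take_of_length_le (by omega)]
      simp only [List.filter_cons, List.filter_nil, hg, ht]
      norm_num
      decide

lemma len_useMask (w : List String) (m : List Char) :
    (pyUseMask w m).length = (m.take w.length).count '1' := by
  rw [pyUseMask, List.length_map, cnt_range]

lemma cnt (w : List String) (i : Nat) (hi : i < 2 ^ w.length) :
    (pyUseMask w (pb w.length i)).length = PySem.Chars.count (PySem.Int.toBinChars (i : Int)) ['1'] := by
  rw [len_useMask, count_single, tb]
  by_cases h0 : w.length = 0
  · rw [h0]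
    rw [h0] at hi
    simp at hi
    subst hi
    rw [bdig]
    simp
    decide
  · have hlen : (pb w.length i).length = w.length := len_pb _ _ (by omega) hi
    rw [List.take_of_length_le (le_of_eq hlen), pb_eq]
    simp [List.count_replicate]

lemma makeMask_eq (n : Nat) :
    pyMakeMask n = ((List.range (2 ^ n)).filter
        (fun (i : Nat) => !(decide (PySem.Chars.count (PySem.Int.toBinChars (i : Int)) ['1'] < 2)))).map
        (fun i => pb n i) := by
  unfold pyMakeMask
  have hstep : (fun (mask : List (List Char)) (i : Nat) =>
      let bin_i := PySem.Int.toBinChars (i : Int)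
      if PySem.Chars.count bin_i ['1'] < 2 then mask
      else mask ++ [PySem.Chars.zfill bin_i (n : Int)])
      = (fun mask (i : Nat) => if (!(decide (PySem.Chars.count (PySem.Int.toBinChars (i : Int)) ['1'] < 2))) = true
          then mask ++ [pb n i] else mask) := by
    funext mask i
    by_cases h : PySem.Chars.count (PySem.Int.toBinChars (i : Int)) ['1'] < 2 <;> simp [h, pb]
  rw [hstep, PySem.List.foldl_append_if]
  simp

lemma upd_eq (t : PySem.Dict String (List String)) (mz : String) (c : String) :
    (match t.get? mz with
     | none => t.insert mz [c]
     | some v => t.insert mz (v ++ [c])) = t.insert mz (t.getD mz [] ++ [c]) := by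
  rcases h : t.get? mz with _ | v <;>
    simp [PySem.Dict.getD_eq_get?_getD, h]

lemma inner_eq (w : List String) (c : String) (t : PySem.Dict String (List String)) :
    (pyMakeMask w.length).foldl (fun table mask =>
        let mz := PySem.Str.join " " (pyUseMask w mask)
        match table.get? mz with
        | none => table.insert mz [c]
        | some v => table.insert mz (v ++ [c])) t
      = (subseqsB w).foldl (fun table sub =>
        if sub.length < 2 then table
        else
          let mz := PySem.Str.join " " sub
          table.insert mz (table.getD mz [] ++ [c])) t := by
  rw [makeMask_eq, List.foldl_map]
  have hrstep : (fun (table : PySem.Dict String (List String)) (sub : List String) =>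
      if sub.length < 2 then table
      else
        let mz := PySem.Str.join " " sub
        table.insert mz (table.getD mz [] ++ [c]))
      = (fun table sub => if (!(decide (sub.length < 2))) = true
          then table.insert (PySem.Str.join " " sub) (table.getD (PySem.Str.join " " sub) [] ++ [c])
          else table) := by
    funext table sub
    by_cases h : sub.length < 2 <;> simp [h]
  rw [hrstep, ← List.foldl_filter, ← main_subs, List.filter_map, List.foldl_map]
  have hfil : List.filter ((fun (sub : List String) => !(decide (sub.length < 2))) ∘ (fun i => pyUseMask w (pb w.length i)))
        (List.range (2 ^ w.length))
      = List.filter (fun (i : Nat) => !(decide (PySem.Chars.count (PySem.Int.toBinChars (i : Int)) ['1'] < 2)))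
        (List.range (2 ^ w.length)) := by
    apply List.filter_congr
    intro i hi
    rw [List.mem_range] at hi
    simp [Function.comp, cnt w i hi]
  rw [hfil]
  apply PySem.List.foldl_congr_mem
  intro acc i hi
  exact upd_eq acc (PySem.Str.join " " (pyUseMask w (pb w.length i))) c

-- ===== VERDICT (by name: the statement is the Claim_ definition above) =====
theorem make_z_intersection_table_spec : Claim_equal_make_z_intersection_table := by
  intro data _hdom hpre
  show make_z_intersection_table data = make_z_intersection_table_alt data
  unfold make_z_intersection_table make_z_intersection_table_alt cleanedA
  dsimp only
  congr 1
  congr 1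
  apply PySem.List.foldl_congr_mem
  intro t p hp
  have hcov : (PySem.Dict.mk data).getD p.1 [] = p.2 := by
    exact PySem.Dict.getD_of_mem_items _ (by simpa using hp) (by simpa using hpre) []
  simp only [hcov]
  exact inner_eq p.2 p.1 t
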